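-- pv_equiv track=rewrite | github.com/privacy-scaling-explorations/zkevm-specs | src/zkevm_specs/evm_circuit/execution/memory.py | make_X31_off
-- ===== SOURCE A (Python) =====
-- def make_X31_off(X, offset_bits):
--     # Express the bits of `31-offset` by flipping the bits of `offset`.
--     assert len(offset_bits) == 5
--     not_bits = [1 - b for b in offset_bits]
--
--     X_pow = 1
--     for bit in reversed(not_bits):
--         X_pow = X_pow * X_pow
--         X_pow = X_pow * (X if bit else 1)
--     return X_pow
-- ===== SOURCE B (Python) =====
-- def make_X31_off(X, offset_bits):
--     assert len(offset_bits) == 5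
--     # A multiplies X into the running square exactly when 1 - b is truthy, i.e. b != 1.
--     N = sum(1 << i for i, b in enumerate(offset_bits) if b != 1)
--     return X ** N
-- ===== Notes on version B (the rewrite author's own statement) =====
-- stated objective: simpler
-- what changed: Replaces the reversed square-and-multiply loop over flipped bits by directly building the integer exponent N from the bits and returning X ** N.
-- outside the precondition, e.g. on make_X31_off(2, [0, 0]): A raises AssertionError, B raises AssertionError
import Mathlib
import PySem

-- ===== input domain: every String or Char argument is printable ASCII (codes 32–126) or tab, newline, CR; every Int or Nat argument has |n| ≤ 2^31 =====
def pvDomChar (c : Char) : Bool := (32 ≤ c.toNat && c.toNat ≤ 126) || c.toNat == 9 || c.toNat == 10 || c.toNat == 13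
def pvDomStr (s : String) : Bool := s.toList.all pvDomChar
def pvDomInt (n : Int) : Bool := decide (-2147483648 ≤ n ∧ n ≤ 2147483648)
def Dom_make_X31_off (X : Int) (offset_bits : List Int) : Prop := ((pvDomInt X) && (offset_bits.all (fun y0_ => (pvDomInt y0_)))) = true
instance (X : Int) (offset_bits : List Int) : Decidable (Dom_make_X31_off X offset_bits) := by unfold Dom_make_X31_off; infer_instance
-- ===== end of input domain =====

-- B replaces A's reversed square-and-multiply loop by computing the exponent N and returning X^N (simpler).


-- ===== PORT A =====
-- assert len==5; not_bits = map (1 - ·); loop over reversed not_bits: square, then multiply by X iff bit truthy (≠ 0)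
def make_X31_off (X : Int) (offset_bits : List Int) : Int :=
  let not_bits := offset_bits.map (fun b => 1 - b)
  not_bits.reverse.foldl (fun X_pow bit => (X_pow * X_pow) * (if bit ≠ 0 then X else 1)) 1

-- ===== PORT B =====
-- N = sum(1 << i for i, b in enumerate(offset_bits) if b != 1); return X ** N
-- (the enumerated generator-sum is ported as structural recursion carrying the index i)
def altExp (bs : List Int) (i : Nat) : Nat :=
  match bs with
  | [] => 0
  | b :: rest => (if b ≠ 1 then 1 <<< i else 0) + altExp rest (i + 1)

def make_X31_off_alt (X : Int) (offset_bits : List Int) : Int :=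
  X ^ altExp offset_bits 0

-- ===== PRECONDITION & SPEC =====
-- A asserts len(offset_bits) == 5; Pre_ excludes exactly the AssertionError inputs.
def Pre_make_X31_off (X : Int) (offset_bits : List Int) : Prop := offset_bits.length = 5
instance (X : Int) (offset_bits : List Int) : Decidable (Pre_make_X31_off X offset_bits) := by unfold Pre_make_X31_off; infer_instance
def pvWitness_make_X31_off : Int × List Int := (3, [1, 0, 1, 0, 0])

def Spec_make_X31_off (X : Int) (offset_bits : List Int) (out : Int) : Prop := out = make_X31_off_alt X offset_bits
instance (X : Int) (offset_bits : List Int) (out : Int) : Decidable (Spec_make_X31_off X offset_bits out) := by unfold Spec_make_X31_off; infer_instance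

-- ===== CLAIM (what is proved, stated in full; the proofs are below) =====
def Claim_equal_make_X31_off : Prop := ∀ (X : Int) (offset_bits : List Int), Dom_make_X31_off X offset_bits → Pre_make_X31_off X offset_bits → Spec_make_X31_off X offset_bits (make_X31_off X offset_bits)

-- ===== LEMMAS AND PROOFS =====

lemma altExp_succ (bs : List Int) (i : Nat) : altExp bs (i + 1) = 2 * altExp bs i := by
  induction bs generalizing i with
  | nil => simp [altExp]
  | cons b rest ih =>
    simp only [altExp, ih]
    split <;> simp [Nat.shiftLeft_eq, pow_succ] <;> ring

-- loop invariant of A's square-and-multiply fold, for any accumulator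
lemma foldl_sqmul (X acc : Int) (bs : List Int) :
    ((bs.map (fun b => (1 : Int) - b)).reverse.foldl
        (fun X_pow bit => (X_pow * X_pow) * (if bit ≠ 0 then X else 1)) acc)
      = acc ^ (2 ^ bs.length) * X ^ altExp bs 0 := by
  induction bs generalizing acc with
  | nil => simp [altExp]
  | cons b rest ih =>
    simp only [List.map_cons, List.reverse_cons, List.foldl_append, List.foldl_cons,
      List.foldl_nil, ih, List.length_cons]
    rw [altExp, altExp_succ]
    by_cases hb : b = 1
    · simp [hb, pow_succ, pow_mul]; ring
    · rw [if_pos (by omega : (1:Int) - b ≠ 0), if_pos hb]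
      simp [Nat.shiftLeft_eq, pow_succ, pow_add, pow_mul]
      ring

-- ===== VERDICT (by name: the statement is the Claim_ definition above) =====
theorem make_X31_off_spec : Claim_equal_make_X31_off := by
  intro X offset_bits _ _
  unfold Spec_make_X31_off make_X31_off make_X31_off_alt
  rw [foldl_sqmul]
  simp
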